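-- pv_equiv track=rewrite | github.com/adapaania/HDFC-Internship | notebooks/notebooks/02_accounts_test_feature_engineering.py | analyze_payment_history
-- ===== SOURCE A (Python) =====
-- def analyze_payment_history(payment_history):
--     months = [payment_history[i:i+3] for i in range(0, len(payment_history), 3)]
--
--     late_payment_count = sum(1 for month in months if month != "000")
--     max_consecutive_late_payments = 0
--     consecutive_late_payments = 0
--     last_payment_was_late = False
--
--     for month in months:
--         if month != "000":
--             consecutive_late_payments = consecutive_late_payments + 1 if last_payment_was_late else 1
--             last_payment_was_late = True
--         else:
--             max_consecutive_late_payments = max(max_consecutive_late_payments, consecutive_late_payments)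
--             consecutive_late_payments = 0
--             last_payment_was_late = False
--
--     max_consecutive_late_payments = max(max_consecutive_late_payments, consecutive_late_payments)
--     on_time_payment_count = len(months) - late_payment_count
--     time_since_last_late_payment = next((i for i, month in enumerate(reversed(months)) if month != "000"), len(months))
--
--     return {
--         'late_payments': late_payment_count,
--         'on_time_payments': on_time_payment_count,
--         'max_consecutive_late_payments': max_consecutive_late_payments,
--         'time_since_last_late_payment': time_since_last_late_payment
--     }
-- ===== SOURCE B (Python) =====
-- def analyze_payment_history(payment_history):
--     # One forward pass over the 3-char months: count lates, track the current
--     # late run and its max, and count the trailing on-time months.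
--     total = 0
--     late = 0
--     cur = 0
--     best = 0
--     trailing = 0
--     for i in range(0, len(payment_history), 3):
--         month = payment_history[i:i+3]
--         total += 1
--         if month != "000":
--             late += 1
--             cur += 1
--             if cur > best:
--                 best = cur
--             trailing = 0
--         else:
--             cur = 0
--             trailing += 1
--     return {
--         'late_payments': late,
--         'on_time_payments': total - late,
--         'max_consecutive_late_payments': best,
--         'time_since_last_late_payment': trailing,
--     }
-- ===== Notes on version B (the rewrite author's own statement) =====
-- stated objective: simpler
-- what changed: Replaced A's months list plus three separate scans (a counting comprehension, a consecutive-run loop with a boolean flag, and a reversed-enumerate search) with a single forward pass that maintains late count, current/max run, and a trailing on-time counter.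
import Mathlib
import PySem

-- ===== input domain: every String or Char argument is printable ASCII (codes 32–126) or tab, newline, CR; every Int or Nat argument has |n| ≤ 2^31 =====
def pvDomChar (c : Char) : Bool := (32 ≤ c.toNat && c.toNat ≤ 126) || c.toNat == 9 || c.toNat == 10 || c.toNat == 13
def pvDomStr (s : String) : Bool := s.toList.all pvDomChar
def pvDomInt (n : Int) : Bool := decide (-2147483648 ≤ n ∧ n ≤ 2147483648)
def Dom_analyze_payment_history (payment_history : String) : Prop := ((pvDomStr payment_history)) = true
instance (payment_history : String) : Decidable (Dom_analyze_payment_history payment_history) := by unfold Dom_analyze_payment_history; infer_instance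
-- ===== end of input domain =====

-- B replaces A's three separate scans over the month list with a single forward pass (simpler decomposition, same O(n) cost).

-- ===== PORT A =====
def analyze_payment_history (payment_history : String) : List (String × Int) :=
  let months : List (List Char) :=
    (PySem.List.pyRange 0 (PySem.Str.len payment_history) 3).map
      (fun i => PySem.List.slice payment_history.toList (some i) (some (i + 3)))
  let late_payment_count : Int :=
    months.foldl (fun acc month => if month ≠ ['0','0','0'] then acc + 1 else acc) 0
  let st :=
    months.foldl
      (fun (st : Int × Int × Bool) month =>
        match st with
        | (maxc, cur, last) =>
          if month ≠ ['0','0','0'] then (maxc, if last then cur + 1 else 1, true)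
          else (max maxc cur, 0, false))
      (0, 0, false)
  let max_consecutive_late_payments : Int := max st.1 st.2.1
  let on_time_payment_count : Int := (months.length : Int) - late_payment_count
  let time_since_last_late_payment : Int :=
    match months.reverse.findIdx? (fun month => !(month == ['0','0','0'])) with
    | some i => (i : Int)
    | none => (months.length : Int)
  [("late_payments", late_payment_count),
   ("on_time_payments", on_time_payment_count),
   ("max_consecutive_late_payments", max_consecutive_late_payments),
   ("time_since_last_late_payment", time_since_last_late_payment)]

-- ===== PORT B =====
def analyze_payment_history_alt (payment_history : String) : List (String × Int) :=
  let st :=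
    (PySem.List.pyRange 0 (PySem.Str.len payment_history) 3).foldl
      (fun (st : Int × Int × Int × Int × Int) i =>
        match st with
        | (total, late, cur, best, trailing) =>
          let month := PySem.List.slice payment_history.toList (some i) (some (i + 3))
          if month ≠ ['0','0','0'] then
            (total + 1, late + 1, cur + 1, if cur + 1 > best then cur + 1 else best, 0)
          else
            (total + 1, late, 0, best, trailing + 1))
      (0, 0, 0, 0, 0)
  match st with
  | (total, late, _cur, best, trailing) =>
    [("late_payments", late),
     ("on_time_payments", total - late),
     ("max_consecutive_late_payments", best),
     ("time_since_last_late_payment", trailing)]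

-- ===== PRECONDITION & SPEC =====
def Spec_analyze_payment_history (payment_history : String) (out : List (String × Int)) : Prop := out = analyze_payment_history_alt payment_history
instance (payment_history : String) (out : List (String × Int)) : Decidable (Spec_analyze_payment_history payment_history out) := by unfold Spec_analyze_payment_history; infer_instance

-- ===== CLAIM (what is proved, stated in full; the proofs are below) =====
def Claim_equal_analyze_payment_history : Prop := ∀ (payment_history : String), Dom_analyze_payment_history payment_history → Spec_analyze_payment_history payment_history (analyze_payment_history payment_history)

-- ===== LEMMAS AND PROOFS =====

-- proof-side names for the two loop bodies (defeq to the inline lambdas of the ports)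
def pvB (f : Int → List Char) (st : Int × Int × Int × Int × Int) (i : Int) : Int × Int × Int × Int × Int :=
  match st with
  | (total, late, cur, best, trailing) =>
    if f i ≠ ['0','0','0'] then
      (total + 1, late + 1, cur + 1, if cur + 1 > best then cur + 1 else best, 0)
    else
      (total + 1, late, 0, best, trailing + 1)

def pvCnt (acc : Int) (m : List Char) : Int := if m ≠ ['0','0','0'] then acc + 1 else acc

def pvRun (st : Int × Int × Bool) (m : List Char) : Int × Int × Bool :=
  match st with
  | (maxc, cur, last) =>
    if m ≠ ['0','0','0'] then (maxc, if last then cur + 1 else 1, true)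
    else (max maxc cur, 0, false)

lemma pvB_total (f : Int → List Char) : ∀ (l : List Int) (t la c b tr : Int),
    (l.foldl (pvB f) (t, la, c, b, tr)).1 = t + l.length := by
  intro l
  induction l with
  | nil => intro t la c b tr; simp
  | cons a l ih =>
    intro t la c b tr
    simp only [List.foldl_cons, pvB]
    split_ifs <;> rw [ih] <;> simp <;> omega

lemma pvB_late (f : Int → List Char) : ∀ (l : List Int) (t la c b tr : Int),
    (l.foldl (pvB f) (t, la, c, b, tr)).2.1
      = l.foldl (fun acc i => pvCnt acc (f i)) la := by
  intro l
  induction l with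
  | nil => intro t la c b tr; rfl
  | cons a l ih =>
    intro t la c b tr
    simp only [List.foldl_cons, pvB, pvCnt]
    split_ifs <;> rw [ih] <;> simp [pvCnt]

lemma pvB_best (f : Int → List Char) : ∀ (l : List Int) (maxc cur : Int) (last : Bool)
    (t la best tr : Int),
    0 ≤ maxc → 0 ≤ cur → best = max maxc cur → (last = false → cur = 0) →
    (l.foldl (pvB f) (t, la, cur, best, tr)).2.2.2.1
      = max (l.foldl (fun st i => pvRun st (f i)) (maxc, cur, last)).1
            (l.foldl (fun st i => pvRun st (f i)) (maxc, cur, last)).2.1 := by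
  intro l
  induction l with
  | nil =>
    intro maxc cur last t la best tr h1 h2 h3 _h4
    simpa using h3
  | cons a l ih =>
    intro maxc cur last t la best tr h1 h2 h3 h4
    simp only [List.foldl_cons]
    by_cases hm : f a ≠ ['0','0','0']
    · have hstep1 : pvB f (t, la, cur, best, tr) a
          = (t + 1, la + 1, cur + 1, max maxc (cur + 1), 0) := by
        simp only [pvB, if_pos hm]
        have : (if cur + 1 > best then cur + 1 else best) = max maxc (cur + 1) := by
          rw [h3]
          simp only [max_def]
          split_ifs <;> omega
        rw [this]
      have hstep2 : pvRun (maxc, cur, last) (f a) = (maxc, cur + 1, true) := by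
        simp only [pvRun, if_pos hm]
        cases last with
        | false => simp [h4 rfl]
        | true => simp
      rw [hstep1, hstep2]
      exact ih maxc (cur + 1) true (t + 1) (la + 1) _ 0 h1 (by omega) rfl (by simp)
    · have hstep1 : pvB f (t, la, cur, best, tr) a = (t + 1, la, 0, best, tr + 1) := by
        simp only [pvB, if_neg hm]
      have hstep2 : pvRun (maxc, cur, last) (f a) = (max maxc cur, 0, false) := by
        simp only [pvRun, if_neg hm]
      rw [hstep1, hstep2]
      refine ih (max maxc cur) 0 false (t + 1) la best (tr + 1) ?_ le_rfl ?_ (fun _ => rfl)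
      · exact le_trans h1 (le_max_left _ _)
      · rw [h3]
        simp only [max_def]
        split_ifs <;> omega

lemma pvB_trail (f : Int → List Char) : ∀ (l : List Int) (t la c b tr : Int),
    (l.foldl (pvB f) (t, la, c, b, tr)).2.2.2.2
      = match ((l.map f).reverse).findIdx? (fun m => !(m == ['0','0','0'])) with
        | some i => (i : Int)
        | none => (l.length : Int) + tr := by
  intro l
  induction l using List.reverseRecOn with
  | nil => intro t la c b tr; simp
  | append_singleton l a ih =>
    intro t la c b tr
    rw [List.foldl_append]
    rcases hR : l.foldl (pvB f) (t, la, c, b, tr) with ⟨t1, la1, c1, b1, tr1⟩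
    have htr := ih t la c b tr
    rw [hR] at htr
    simp only at htr
    simp only [List.foldl_cons, List.foldl_nil, List.map_append, List.map_cons, List.map_nil,
      List.reverse_append, List.reverse_cons, List.reverse_nil, List.nil_append,
      List.cons_append, List.singleton_append, List.findIdx?_cons]
    by_cases hm : f a = ['0','0','0']
    · simp only [pvB, if_neg (by simp [hm] : ¬ f a ≠ ['0','0','0']), hm, beq_self_eq_true,
        Bool.not_true, cond_false]
      cases hf : ((l.map f).reverse).findIdx? (fun m => !(m == ['0','0','0'])) with
      | some i =>
        rw [hf] at htr
        simp only at htr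
        simp only [hf, Option.map_some, htr]
        rw [if_neg (fun h => h rfl)]
        push_cast
        ring
      | none =>
        rw [hf] at htr
        simp only at htr
        simp only [hf, Option.map_none, htr, List.length_append, List.length_cons,
          List.length_nil]
        rw [if_neg (fun h => h rfl)]
        push_cast
        ring
    · have hb : (!(f a == ['0','0','0'])) = true := by simp [hm]
      simp only [pvB, if_pos (by simp [hm] : f a ≠ ['0','0','0']), hb, cond_true]
      simp

-- ===== VERDICT (by name: the statement is the Claim_ definition above) =====
theorem analyze_payment_history_spec : Claim_equal_analyze_payment_history := by
  intro s _hdom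
  unfold Spec_analyze_payment_history
  have hB : analyze_payment_history_alt s =
      (match (PySem.List.pyRange 0 (PySem.Str.len s) 3).foldl
          (pvB (fun i => PySem.List.slice s.toList (some i) (some (i + 3)))) (0, 0, 0, 0, 0) with
       | (total, late, _cur, best, trailing) =>
         [("late_payments", late),
          ("on_time_payments", total - late),
          ("max_consecutive_late_payments", best),
          ("time_since_last_late_payment", trailing)]) := rfl
  have hA : analyze_payment_history s =
      [("late_payments",
         ((PySem.List.pyRange 0 (PySem.Str.len s) 3).map
            (fun i => PySem.List.slice s.toList (some i) (some (i + 3)))).foldl pvCnt 0),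
       ("on_time_payments",
         (((PySem.List.pyRange 0 (PySem.Str.len s) 3).map
            (fun i => PySem.List.slice s.toList (some i) (some (i + 3)))).length : Int)
           - ((PySem.List.pyRange 0 (PySem.Str.len s) 3).map
                (fun i => PySem.List.slice s.toList (some i) (some (i + 3)))).foldl pvCnt 0),
       ("max_consecutive_late_payments",
         max (((PySem.List.pyRange 0 (PySem.Str.len s) 3).map
                (fun i => PySem.List.slice s.toList (some i) (some (i + 3)))).foldl
                  pvRun (0, 0, false)).1
             (((PySem.List.pyRange 0 (PySem.Str.len s) 3).map
                (fun i => PySem.List.slice s.toList (some i) (some (i + 3)))).foldl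
                  pvRun (0, 0, false)).2.1),
       ("time_since_last_late_payment",
         match (((PySem.List.pyRange 0 (PySem.Str.len s) 3).map
                  (fun i => PySem.List.slice s.toList (some i) (some (i + 3)))).reverse).findIdx?
                    (fun month => !(month == ['0','0','0'])) with
         | some i => (i : Int)
         | none => (((PySem.List.pyRange 0 (PySem.Str.len s) 3).map
                      (fun i => PySem.List.slice s.toList (some i) (some (i + 3)))).length : Int))]
      := rfl
  rw [hA, hB]
  set f : Int → List Char := fun i => PySem.List.slice s.toList (some i) (some (i + 3)) with hf
  set r : List Int := PySem.List.pyRange 0 (PySem.Str.len s) 3 with hr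
  rcases hR : r.foldl (pvB f) (0, 0, 0, 0, 0) with ⟨t, la, c, b, tr⟩
  have hT := pvB_total f r 0 0 0 0 0
  have hL := pvB_late f r 0 0 0 0 0
  have hBst := pvB_best f r 0 0 false 0 0 0 0 le_rfl le_rfl (by simp) (fun _ => rfl)
  have hTr := pvB_trail f r 0 0 0 0 0
  rw [hR] at hT hL hBst hTr
  simp only at hT hL hBst hTr
  rw [hT, hL, hBst, hTr]
  simp only [List.foldl_map, List.length_map]
  cases hfind : ((r.map f).reverse).findIdx? (fun m => !(m == ['0','0','0'])) with
  | some i => simp [hfind]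
  | none => simp [hfind]
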